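-- pv_equiv track=rewrite | github.com/dev-logic12/Problem-Solving | 프로그래머스/unrated/181932. 코드 처리하기/코드 처리하기.py | solution
-- ===== SOURCE A (Python) =====
-- def solution(code):
--     mode = 0
--     ret = []
--     for idx in range(len(code)):
--         if mode == 0:
--             if code[idx] != '1':
--                 if idx % 2 == 0:
--                     ret.append(code[idx])
--             elif code[idx] == '1':
--                 mode = 1
--         elif mode == 1:
--             if code[idx] != '1':
--                 if idx % 2 != 0:
--                     ret.append(code[idx])
--             elif code[idx] == '1':
--                 mode = 0
--
--     if not ret:
--         return 'EMPTY'
--     return ''.join(ret)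
-- ===== SOURCE B (Python) =====
-- def solution(code):
--     out = []
--     pos = 0
--     for seg_i, seg in enumerate(code.split('1')):
--         par = seg_i % 2
--         for j, ch in enumerate(seg):
--             if (pos + j) % 2 == par:
--                 out.append(ch)
--         pos += len(seg) + 1
--     return ''.join(out) if out else 'EMPTY'
-- ===== Notes on version B (the rewrite author's own statement) =====
-- stated objective: alternative
-- what changed: Replaces the character-by-character mode state machine with a split-on-'1' decomposition: segments inherit mode from their position parity, and characters are emitted when the running global index parity matches the segment parity.
import Mathlib
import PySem

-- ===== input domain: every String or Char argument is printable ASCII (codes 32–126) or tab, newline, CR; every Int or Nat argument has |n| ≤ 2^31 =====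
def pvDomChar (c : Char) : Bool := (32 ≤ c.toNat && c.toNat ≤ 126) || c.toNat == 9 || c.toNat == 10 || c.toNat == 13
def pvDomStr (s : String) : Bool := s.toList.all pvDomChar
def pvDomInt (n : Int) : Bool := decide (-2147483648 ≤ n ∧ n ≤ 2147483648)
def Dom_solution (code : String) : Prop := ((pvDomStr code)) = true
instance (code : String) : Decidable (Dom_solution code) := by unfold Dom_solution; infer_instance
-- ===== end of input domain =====

-- B replaces A's mode-toggling state machine with a split-on-'1' decomposition
-- (segment parity = mode, running global index): an alternative of the same cost.

-- ===== PORT A =====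
-- for idx in range(len(code)): state (mode, ret); branches in A's order
def solution (code : String) : String :=
  let cs := code.toList
  let st := (PySem.List.pyRange 0 cs.length 1).foldl
    (fun (s : Nat × List Char) idx =>
      let c := PySem.List.pyGetD cs idx ' '   -- code[idx]; idx is always in range here
      if s.1 = 0 then
        if c ≠ '1' then
          (if PySem.Int.mod idx 2 = 0 then (s.1, s.2 ++ [c]) else s)
        else (1, s.2)
      else
        if c ≠ '1' then
          (if PySem.Int.mod idx 2 ≠ 0 then (s.1, s.2 ++ [c]) else s)
        else (0, s.2))
    (0, [])
  if st.2 = [] then "EMPTY" else String.mk st.2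

-- ===== PORT B =====
-- for seg_i, seg in enumerate(code.split('1')): state (pos, out); inner loop over enumerate(seg)
def solution_alt (code : String) : String :=
  let segments := PySem.Chars.splitOn code.toList ['1']
  let st := (PySem.List.enumerate segments).foldl
    (fun (acc : Nat × List Char) p =>
      let par := PySem.Int.mod p.1 2
      let out := (PySem.List.enumerate p.2).foldl
        (fun (o : List Char) q =>
          if PySem.Int.mod ((acc.1 : Int) + q.1) 2 = par then o ++ [q.2] else o)
        acc.2
      (acc.1 + p.2.length + 1, out))
    (0, [])
  if st.2 = [] then "EMPTY" else String.mk st.2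

-- ===== PRECONDITION & SPEC =====
def Spec_solution (code : String) (out : String) : Prop := out = solution_alt code
instance (code : String) (out : String) : Decidable (Spec_solution code out) := by unfold Spec_solution; infer_instance

-- ===== CLAIM (what is proved, stated in full; the proofs are below) =====
def Claim_equal_solution : Prop := ∀ (code : String), Dom_solution code → Spec_solution code (solution code)

-- ===== LEMMAS AND PROOFS =====

-- reference emission: chars of l at global index i in mode m (m ∈ {0,1}), '1' toggles
def pvEmit : List Char → Nat → Nat → List Char
  | [], _, _ => []
  | c :: rest, i, m =>
    if c = '1' then pvEmit rest (i+1) (1 - m)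
    else if i % 2 = m then c :: pvEmit rest (i+1) m else pvEmit rest (i+1) m

-- final mode of A's loop
def pvFm : List Char → Nat → Nat
  | [], m => m
  | c :: rest, m => pvFm rest (if c = '1' then 1 - m else m)

-- Python's str.split('1') as plain recursion (cur = current segment so far)
def pvSplit1 : List Char → List Char → List (List Char)
  | pre, [] => [pre]
  | pre, c :: rest => if c = '1' then pre :: pvSplit1 [] rest else pvSplit1 (pre ++ [c]) rest

-- chars of a single segment kept by B: local scan at global index pos, target parity m
def pvInner : List Char → Nat → Nat → List Char
  | [], _, _ => []
  | c :: s, pos, m => (if pos % 2 = m then [c] else []) ++ pvInner s (pos+1) m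

-- what B's outer loop collects over a segment list starting at pos, segment index k
def pvCollect : List (List Char) → Nat → Nat → List Char
  | [], _, _ => []
  | s :: ss, pos, k => pvInner s pos (k % 2) ++ pvCollect ss (pos + s.length + 1) (k + 1)

theorem pvInner_append (xs : List Char) (c : Char) (pos m : Nat) :
    pvInner (xs ++ [c]) pos m
      = pvInner xs pos m ++ (if (pos + xs.length) % 2 = m then [c] else []) := by
  induction xs generalizing pos with
  | nil => simp [pvInner]
  | cons x xs ih =>
      simp only [List.cons_append, pvInner, ih, List.length_cons]
      have : pos + 1 + xs.length = pos + (xs.length + 1) := by omega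
      rw [this, List.append_assoc]
      rfl

theorem pvCollect_split1 (l : List Char) (pre : List Char) (pos k : Nat) :
    pvCollect (pvSplit1 pre l) pos k
      = pvInner pre pos (k % 2) ++ pvEmit l (pos + pre.length) (k % 2) := by
  induction l generalizing pre pos k with
  | nil => simp [pvSplit1, pvCollect, pvEmit]
  | cons c rest ih =>
      by_cases hc : c = '1'
      · subst hc
        simp only [pvSplit1, pvEmit, reduceIte, pvCollect]
        rw [ih [] (pos + pre.length + 1) (k + 1)]
        have h2 : (k + 1) % 2 = 1 - k % 2 := by omega
        simp [pvInner, h2]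
      · simp only [pvSplit1, if_neg hc, pvEmit, if_neg hc]
        rw [ih (pre ++ [c]) pos k, pvInner_append]
        have hm : k % 2 = 0 ∨ k % 2 = 1 := by omega
        by_cases hp : (pos + pre.length) % 2 = k % 2
        · simp [hp, List.append_assoc, List.length_append]
          have : pos + (pre.length + 1) = pos + pre.length + 1 := by omega
          simp [this]
        · simp [hp, List.length_append]
          have : pos + (pre.length + 1) = pos + pre.length + 1 := by omega
          simp [this]

-- splitOn with a single-character separator is pvSplit1
theorem pvGo_spec (fuel : Nat) (l cur : List Char) (acc : List (List Char))
    (h : l.length < fuel) :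
    PySem.Chars.splitOn.go ['1'] fuel l cur acc = acc.reverse ++ pvSplit1 cur.reverse l := by
  induction fuel generalizing l cur acc with
  | zero => omega
  | succ fuel ih =>
      cases l with
      | nil =>
          rw [PySem.Chars.splitOn.go]
          · simp [pvSplit1]
          · omega
      | cons c rest =>
          rw [PySem.Chars.splitOn.go]
          by_cases hc : c = '1'
          · subst hc
            have hpre : List.isPrefixOf ['1'] ('1' :: rest) = true := by
              simp [List.isPrefixOf]
            simp only [hpre, reduceIte, List.length_cons, List.length_nil, Nat.zero_add,
              List.drop_succ_cons, List.drop_zero]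
            rw [ih rest [] (cur.reverse :: acc) (by simpa using Nat.lt_of_succ_lt_succ h)]
            simp [pvSplit1]
          · have hpre : List.isPrefixOf ['1'] (c :: rest) = false := by
              simp [List.isPrefixOf]
              exact fun hh => absurd hh.symm hc
            simp only [hpre, Bool.false_eq_true, if_false]
            rw [ih rest (c :: cur) acc (by simpa using Nat.lt_of_succ_lt_succ h)]
            simp [pvSplit1, hc]

theorem pvSplitOn_eq (cs : List Char) :
    PySem.Chars.splitOn cs ['1'] = pvSplit1 [] cs := by
  rw [PySem.Chars.splitOn, pvGo_spec (cs.length + 1) cs [] [] (by omega)]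
  simp

-- A's loop computes (final mode, ret ++ pvEmit …)
theorem pvA_loop (cs : List Char) (i m : Nat) (r : List Char) (hm : m ≤ 1) :
    (PySem.List.enumerate cs (i : Int)).foldl
      (fun (s : Nat × List Char) p =>
        if s.1 = 0 then
          if p.2 ≠ '1' then
            (if PySem.Int.mod p.1 2 = 0 then (s.1, s.2 ++ [p.2]) else s)
          else (1, s.2)
        else
          if p.2 ≠ '1' then
            (if PySem.Int.mod p.1 2 ≠ 0 then (s.1, s.2 ++ [p.2]) else s)
          else (0, s.2))
      (m, r)
    = (pvFm cs m, r ++ pvEmit cs i m) := by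
  induction cs generalizing i m r with
  | nil => simp [pvFm, pvEmit]
  | cons c rest ih =>
      rw [PySem.List.enumerate_cons, List.foldl_cons]
      have hmod : PySem.Int.mod (i : Int) 2 = ((i % 2 : Nat) : Int) := by
        simp [PySem.Int.mod, Int.fmod_eq_emod]
      have hcast : ((i : Int) + 1) = ((i + 1 : Nat) : Int) := by push_cast; ring
      by_cases hc : c = '1'
      · subst hc
        rcases (show m = 0 ∨ m = 1 by omega) with h | h <;> subst h <;>
          simp only [reduceIte, ne_eq, not_true_eq_false, if_false, one_ne_zero] <;>
          rw [hcast, ih _ _ _ (by omega)] <;>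
          simp [pvFm, pvEmit]
      · have hm01 : m = 0 ∨ m = 1 := by omega
        rcases hm01 with h0 | h1
        · subst h0
          simp only [if_pos rfl, ne_eq, hc, not_false_eq_true, if_true, hmod]
          by_cases hp : i % 2 = 0
          · rw [hp]
            simp only [Nat.cast_zero, reduceIte]
            rw [hcast, ih _ _ _ (by omega)]
            simp [pvFm, pvEmit, hc, hp, List.append_assoc]
          · have : ((i % 2 : Nat) : Int) ≠ 0 := by omega
            simp only [this, if_false]
            rw [hcast, ih _ _ _ (by omega)]
            simp [pvFm, pvEmit, hc, hp]
        · subst h1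
          simp only [one_ne_zero, if_false, ne_eq, hc, not_false_eq_true, if_true, hmod]
          by_cases hp : i % 2 = 1
          · have : ((i % 2 : Nat) : Int) ≠ 0 := by omega
            simp only [this, ne_eq, not_false_eq_true, if_true]
            rw [hcast, ih _ _ _ (by omega)]
            simp [pvFm, pvEmit, hc, hp, List.append_assoc]
          · have h0 : i % 2 = 0 := by omega
            have : ¬ ((i % 2 : Nat) : Int) ≠ 0 := by omega
            simp only [this, if_false]
            rw [hcast, ih _ _ _ (by omega)]
            simp [pvFm, pvEmit, hc]
            omega

-- B's inner loop is pvInner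
theorem pvB_inner (seg : List Char) (pos k j : Nat) (o : List Char) :
    (PySem.List.enumerate seg (j : Int)).foldl
      (fun (o : List Char) q =>
        if PySem.Int.mod ((pos : Int) + q.1) 2 = PySem.Int.mod (k : Int) 2 then o ++ [q.2] else o)
      o
    = o ++ pvInner seg (pos + j) (k % 2) := by
  induction seg generalizing j o with
  | nil => simp [pvInner]
  | cons c s ih =>
      rw [PySem.List.enumerate_cons, List.foldl_cons]
      have hcast : ((j : Int) + 1) = ((j + 1 : Nat) : Int) := by push_cast; ring
      have hmod : (PySem.Int.mod ((pos : Int) + (j : Int)) 2 = PySem.Int.mod (k : Int) 2)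
          ↔ ((pos + j) % 2 = k % 2) := by
        simp [PySem.Int.mod, Int.fmod_eq_emod]
        omega
      by_cases hp : (pos + j) % 2 = k % 2
      · rw [if_pos (hmod.mpr hp), hcast, ih]
        have : pos + (j + 1) = pos + j + 1 := by omega
        simp [pvInner, hp, this, List.append_assoc]
      · rw [if_neg (fun hh => hp (hmod.mp hh)), hcast, ih]
        have : pos + (j + 1) = pos + j + 1 := by omega
        simp [pvInner, hp, this]

-- B's outer loop final pos
def pvFpos : List (List Char) → Nat → Nat
  | [], pos => pos
  | s :: ss, pos => pvFpos ss (pos + s.length + 1)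

-- B's outer loop collects pvCollect
theorem pvB_loop (ss : List (List Char)) (pos k : Nat) (out : List Char) :
    (PySem.List.enumerate ss (k : Int)).foldl
      (fun (acc : Nat × List Char) p =>
        let par := PySem.Int.mod p.1 2
        let o := (PySem.List.enumerate p.2).foldl
          (fun (o : List Char) q =>
            if PySem.Int.mod ((acc.1 : Int) + q.1) 2 = par then o ++ [q.2] else o)
          acc.2
        (acc.1 + p.2.length + 1, o))
      (pos, out)
    = (pvFpos ss pos, out ++ pvCollect ss pos k) := by
  induction ss generalizing pos k out with
  | nil => simp [pvFpos, pvCollect]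
  | cons s ss ih =>
      rw [PySem.List.enumerate_cons, List.foldl_cons]
      have hcast : ((k : Int) + 1) = ((k + 1 : Nat) : Int) := by push_cast; ring
      have hin := pvB_inner s pos k 0 out
      simp only [PySem.List.enumerate] at hin ⊢
      rw [hcast, show (0 : Int) = ((0 : Nat) : Int) from rfl] at *
      rw [hin, ih]
      simp [pvFpos, pvCollect, List.append_assoc]

theorem solution_eq_alt (code : String) : solution code = solution_alt code := by
  have hA := pvA_loop code.toList 0 0 [] (by omega)
  have hB := pvB_loop (PySem.Chars.splitOn code.toList ['1']) 0 0 []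
  simp only [Nat.cast_zero] at hA hB
  rw [PySem.List.enumerate_eq_map_pyRange code.toList ' ', List.foldl_map] at hA
  have hA' : (PySem.List.pyRange 0 (code.toList.length : Int) 1).foldl
      (fun (s : Nat × List Char) idx =>
        let c := PySem.List.pyGetD code.toList idx ' '
        if s.1 = 0 then
          if c ≠ '1' then
            (if PySem.Int.mod idx 2 = 0 then (s.1, s.2 ++ [c]) else s)
          else (1, s.2)
        else
          if c ≠ '1' then
            (if PySem.Int.mod idx 2 ≠ 0 then (s.1, s.2 ++ [c]) else s)
          else (0, s.2))
      (0, [])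
      = (pvFm code.toList 0, [] ++ pvEmit code.toList 0 0) := hA
  simp only [solution, solution_alt]
  rw [hA', hB, pvSplitOn_eq, pvCollect_split1]
  simp [pvInner]

-- ===== VERDICT (by name: the statement is the Claim_ definition above) =====
theorem solution_spec : Claim_equal_solution := by
  intro code _
  unfold Spec_solution
  exact solution_eq_alt code
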